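-- pv_equiv track=rewrite | github.com/larissavqz/python_bancos_dio | desafio_numeros.py | numero_que_mais_cresce
-- ===== SOURCE A (Python) =====
-- def numero_que_mais_cresce(numeros):
--     contagem = {}
--     maior_frequencia = 0
--     numero_mais_crescente = None
--
--     for numero in numeros:
--         if numero not in contagem:
--             contagem[numero] = 0
--         contagem[numero] += 1
--
--         if contagem[numero] > maior_frequencia:
--             maior_frequencia = contagem[numero]
--             numero_mais_crescente = numero
--
--     return numero_mais_crescente
-- ===== SOURCE B (Python) =====
-- def numero_que_mais_cresce(numeros):
--     contagem = {}
--     for n in numeros: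
--         contagem[n] = contagem.get(n, 0) + 1
--     if not contagem:
--         return None
--     maior_frequencia = max(contagem.values())
--     corrida = {}
--     for n in numeros:
--         corrida[n] = corrida.get(n, 0) + 1
--         if corrida[n] == maior_frequencia:
--             return n
-- ===== Notes on version B (the rewrite author's own statement) =====
-- stated objective: alternative
-- what changed: A keeps a running maximum and candidate updated inside a single counting loop; B first builds the complete frequency table, takes the global maximum of its values, and then makes a second scan that returns the first element whose running count reaches that maximum.
import Mathlib
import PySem

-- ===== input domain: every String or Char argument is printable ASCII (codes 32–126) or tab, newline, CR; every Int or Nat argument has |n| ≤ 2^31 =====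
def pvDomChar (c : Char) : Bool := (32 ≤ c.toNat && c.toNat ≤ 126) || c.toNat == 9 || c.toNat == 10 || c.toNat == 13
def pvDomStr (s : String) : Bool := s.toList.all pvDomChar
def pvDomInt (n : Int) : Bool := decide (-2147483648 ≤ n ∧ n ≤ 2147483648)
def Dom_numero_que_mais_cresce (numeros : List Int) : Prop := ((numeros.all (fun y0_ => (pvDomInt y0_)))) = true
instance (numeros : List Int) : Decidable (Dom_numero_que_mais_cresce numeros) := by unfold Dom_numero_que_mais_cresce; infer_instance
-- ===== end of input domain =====

-- B re-decomposes A's single running-max counting loop into two passes: build the full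
-- frequency table, take the max of its values, then return the first element whose running
-- count reaches it (objective: alternative decomposition; same asymptotic cost).

-- ===== PORT A =====
def numero_que_mais_cresce (numeros : List Int) : Option Int :=
  let final := numeros.foldl
    (fun (st : PySem.Dict Int Int × Int × Option Int) numero =>
      let contagem := if st.1.contains numero then st.1 else st.1.insert numero 0
      let contagem := contagem.modify numero 0 (· + 1)
      if contagem.getD numero 0 > st.2.1 then (contagem, contagem.getD numero 0, some numero)
      else (contagem, st.2.1, st.2.2))
    (PySem.Dict.empty, 0, none)
  final.2.2

-- ===== PORT B =====
-- second pass of Source B: running counts, return the first element reaching maxfreq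
def pvScanLoop (maxfreq : Int) : List Int → PySem.Dict Int Int → Option Int
  | [], _ => none
  | n :: rest, corrida =>
      let corrida := corrida.insert n (corrida.getD n 0 + 1)
      if corrida.getD n 0 = maxfreq then some n else pvScanLoop maxfreq rest corrida

def numero_que_mais_cresce_alt (numeros : List Int) : Option Int :=
  let contagem := numeros.foldl (fun d n => d.insert n (d.getD n 0 + 1)) PySem.Dict.empty
  if contagem.items.isEmpty then none
  else
    let maior_frequencia := (PySem.List.max? contagem.values (fun v => v)).getD 0
    pvScanLoop maior_frequencia numeros PySem.Dict.empty

-- ===== PRECONDITION & SPEC =====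
def Spec_numero_que_mais_cresce (numeros : List Int) (out : Option Int) : Prop := out = numero_que_mais_cresce_alt numeros
instance (numeros : List Int) (out : Option Int) : Decidable (Spec_numero_que_mais_cresce numeros out) := by unfold Spec_numero_que_mais_cresce; infer_instance

-- ===== CLAIM (what is proved, stated in full; the proofs are below) =====
def Claim_equal_numero_que_mais_cresce : Prop := ∀ (numeros : List Int), Dom_numero_que_mais_cresce numeros → Spec_numero_que_mais_cresce numeros (numero_que_mais_cresce numeros)

-- ===== LEMMAS AND PROOFS =====

-- Pure (dict-free) model of A's loop: prefix p already processed, m = running max, w = winner.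
def pvAgo : List Int → List Int → Int → Option Int → Option Int
  | _, [], _, w => w
  | p, n :: r, m, w =>
      if ((p.count n : Int) + 1 > m) then pvAgo (p ++ [n]) r ((p.count n : Int) + 1) (some n)
      else pvAgo (p ++ [n]) r m w

-- Pure model of B's second pass.
def pvScanB : List Int → List Int → Int → Option Int
  | _, [], _ => none
  | p, n :: r, M => if ((p.count n : Int) + 1 = M) then some n else pvScanB (p ++ [n]) r M

-- Maximum running count while scanning r after prefix p.
def pvMc : List Int → List Int → Int
  | _, [] => 0
  | p, n :: r => max ((p.count n : Int) + 1) (pvMc (p ++ [n]) r)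

theorem pvMc_pos : ∀ (r p : List Int), r ≠ [] → 1 ≤ pvMc p r := by
  intro r p h
  cases r with
  | nil => exact absurd rfl h
  | cons n r =>
    simp only [pvMc]
    have h0 : (0:Int) ≤ (p.count n : Int) := by positivity
    have h1 := le_max_left ((p.count n : Int) + 1) (pvMc (p ++ [n]) r)
    omega

theorem pvMc_bound : ∀ (r p : List Int) (x : Int), x ∈ r → ((p ++ r).count x : Int) ≤ pvMc p r := by
  intro r
  induction r with
  | nil => intro p x hx; cases hx
  | cons n r ih =>
    intro p x hx
    simp only [pvMc]
    by_cases hxr : x ∈ r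
    · have := ih (p ++ [n]) x hxr
      have he : (p ++ n :: r) = (p ++ [n]) ++ r := by simp
      rw [he]
      exact le_trans this (le_max_right _ _)
    · have hx' : x = n := by
        rcases List.mem_cons.mp hx with h | h
        · exact h
        · exact absurd h hxr
      rw [hx'] at hxr ⊢
      have hrn : r.count n = 0 := List.count_eq_zero.mpr hxr
      have hc : (p ++ n :: r).count n = p.count n + 1 := by
        rw [List.count_append, List.count_cons]
        simp [hrn]
      rw [hc]
      push_cast
      exact le_max_left _ _

theorem pvMc_attained : ∀ (r p : List Int), r ≠ [] → ∃ x ∈ r, pvMc p r = ((p ++ r).count x : Int) := by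
  intro r
  induction r with
  | nil => intro p h; exact absurd rfl h
  | cons n r ih =>
    intro p _
    simp only [pvMc]
    by_cases hr : r = []
    · subst hr
      refine ⟨n, by simp, ?_⟩
      have h0 : (0:Int) ≤ (p.count n : Int) + 1 := by positivity
      simp only [pvMc, List.append_nil]
      rw [max_eq_left h0, List.count_append, List.count_cons]
      simp
    · rcases ih (p ++ [n]) hr with ⟨y, hy, hmy⟩
      by_cases hle : ((p.count n : Int) + 1) ≤ pvMc (p ++ [n]) r
      · refine ⟨y, List.mem_cons_of_mem _ hy, ?_⟩
        have he : (p ++ n :: r) = (p ++ [n]) ++ r := by simp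
        rw [he, max_eq_right hle, hmy]
      · push_neg at hle
        refine ⟨n, List.mem_cons_self, ?_⟩
        have hb := pvMc_bound r (p ++ [n]) n
        have hrn : r.count n = 0 := by
          by_contra hne
          have hnr : n ∈ r := List.count_pos_iff.mp (Nat.pos_of_ne_zero hne)
          have := hb hnr
          have hc : ((p ++ [n]) ++ r).count n = p.count n + 1 + r.count n := by
            simp [List.count_append, List.count_cons]
            omega
          rw [hc] at this
          push_cast at this
          omega
        have hc : (p ++ n :: r).count n = p.count n + 1 := by
          rw [List.count_append, List.count_cons]
          simp [hrn]
        rw [hc, max_eq_left (le_of_lt hle)]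
        push_cast
        ring

-- The heart: A's running-max loop equals "if nothing beats m, keep w; else first to reach the max".
theorem pvAgo_eq : ∀ (r p : List Int) (m : Int) (w : Option Int),
    (∀ x : Int, (p.count x : Int) ≤ m) →
    pvAgo p r m w = if pvMc p r ≤ m then w else pvScanB p r (pvMc p r) := by
  intro r
  induction r with
  | nil =>
    intro p m w hinv
    have h0 : (0:Int) ≤ m := le_trans (by positivity) (hinv 0)
    simp [pvAgo, pvMc, h0]
  | cons n r ih =>
    intro p m w hinv
    have hcount : ∀ x : Int, ((p ++ [n]).count x : Int)
        = (p.count x : Int) + (if x = n then 1 else 0) := by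
      intro x
      by_cases hx : x = n
      · simp [List.count_append, List.count_cons, hx]
      · simp [List.count_append, List.count_cons, hx]
        exact fun h => hx h.symm
    simp only [pvAgo, pvMc, pvScanB]
    set c : Int := (p.count n : Int) + 1 with hc
    set t : Int := pvMc (p ++ [n]) r with ht
    by_cases hcm : c > m
    · rw [if_pos hcm]
      have hinv' : ∀ x : Int, ((p ++ [n]).count x : Int) ≤ c := by
        intro x; rw [hcount x]; split_ifs with hx
        · subst hx; omega
        · have := hinv x; omega
      rw [ih (p ++ [n]) c (some n) hinv']
      have hmax : ¬ (max c t ≤ m) := by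
        have := le_max_left c t; omega
      rw [if_neg hmax]
      by_cases htc : t ≤ c
      · rw [if_pos htc, max_eq_left htc, if_pos rfl]
      · push_neg at htc
        rw [if_neg (by omega), max_eq_right (le_of_lt htc), if_neg (by omega)]
    · rw [if_neg hcm]
      push_neg at hcm
      have hinv' : ∀ x : Int, ((p ++ [n]).count x : Int) ≤ m := by
        intro x; rw [hcount x]; split_ifs with hx
        · subst hx; omega
        · have := hinv x; omega
      rw [ih (p ++ [n]) m w hinv']
      by_cases htm : t ≤ m
      · rw [if_pos htm, if_pos (max_le hcm htm)]
      · push_neg at htm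
        rw [if_neg (by omega), if_neg (by have := le_max_right c t; omega),
          max_eq_right (by omega), if_neg (by omega)]

-- Bridge: A's dict fold equals the pure model.
theorem pvFoldA_eq : ∀ (r p : List Int) (d : PySem.Dict Int Int) (m : Int) (w : Option Int),
    (∀ x : Int, d.getD x 0 = (p.count x : Int)) →
    (r.foldl
      (fun (st : PySem.Dict Int Int × Int × Option Int) numero =>
        let contagem := if st.1.contains numero then st.1 else st.1.insert numero 0
        let contagem := contagem.modify numero 0 (· + 1)
        if contagem.getD numero 0 > st.2.1 then (contagem, contagem.getD numero 0, some numero)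
        else (contagem, st.2.1, st.2.2))
      (d, m, w)).2.2 = pvAgo p r m w := by
  intro r
  induction r with
  | nil => intro p d m w _; simp [pvAgo]
  | cons n r ih =>
    intro p d m w hinv
    have hd1 : ∀ x : Int,
        (if d.contains n then d else d.insert n 0).getD x 0 = d.getD x 0 := by
      intro x
      cases hcb : d.contains n with
      | true => simp [hcb]
      | false =>
        rw [if_neg (by simp [hcb]), PySem.Dict.getD_insert]
        split_ifs with hx
        · rw [hx]
          exact (PySem.Dict.getD_of_not_contains d 0 hcb).symm
        · rfl
    have hd2 : ∀ x : Int,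
        ((if d.contains n then d else d.insert n 0).modify n 0 (· + 1)).getD x 0
          = ((p ++ [n]).count x : Int) := by
      intro x
      rw [PySem.Dict.getD_modify, hd1 n]
      by_cases hx : x = n
      · subst hx
        have hcx : (p ++ [x]).count x = p.count x + 1 := by
          rw [List.count_append, List.count_cons]; simp
        rw [hcx, if_pos rfl, hinv x]; push_cast; ring
      · have hcx : (p ++ [n]).count x = p.count x := by
          rw [List.count_append, List.count_cons]
          simp
          exact fun h => hx h.symm
        rw [hcx, if_neg hx, hd1 x, hinv x]
    simp only [List.foldl_cons, pvAgo]
    by_cases hgt : ((p.count n : Int) + 1 > m)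
    · rw [if_pos hgt]
      have hcond : ((if d.contains n then d else d.insert n 0).modify n 0 (· + 1)).getD n 0
          = (p.count n : Int) + 1 := by
        rw [hd2 n]
        have : (p ++ [n]).count n = p.count n + 1 := by
          rw [List.count_append, List.count_cons]; simp
        rw [this]; push_cast; ring
      simp only [hcond, hgt, if_pos, gt_iff_lt]
      exact ih (p ++ [n]) _ _ _ hd2
    · rw [if_neg hgt]
      have hcond : ((if d.contains n then d else d.insert n 0).modify n 0 (· + 1)).getD n 0
          = (p.count n : Int) + 1 := by
        rw [hd2 n]
        have : (p ++ [n]).count n = p.count n + 1 := by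
          rw [List.count_append, List.count_cons]; simp
        rw [this]; push_cast; ring
      simp only [hcond, gt_iff_lt]
      rw [if_neg hgt]
      exact ih (p ++ [n]) _ _ _ hd2

-- Bridge: B's second pass equals the pure model.
theorem pvScanLoop_eq : ∀ (r p : List Int) (d : PySem.Dict Int Int) (M : Int),
    (∀ x : Int, d.getD x 0 = (p.count x : Int)) →
    pvScanLoop M r d = pvScanB p r M := by
  intro r
  induction r with
  | nil => intro p d M _; simp [pvScanLoop, pvScanB]
  | cons n r ih =>
    intro p d M hinv
    have hd : ∀ x : Int, (d.insert n (d.getD n 0 + 1)).getD x 0 = ((p ++ [n]).count x : Int) := by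
      intro x
      rw [PySem.Dict.getD_insert]
      by_cases hx : x = n
      · subst hx
        have hcx : (p ++ [x]).count x = p.count x + 1 := by
          rw [List.count_append, List.count_cons]; simp
        rw [hcx, if_pos rfl, hinv x]; push_cast; ring
      · have hcx : (p ++ [n]).count x = p.count x := by
          rw [List.count_append, List.count_cons]
          simp
          exact fun h => hx h.symm
        rw [hcx, if_neg hx, hinv x]
    simp only [pvScanLoop, pvScanB]
    have hn : (d.insert n (d.getD n 0 + 1)).getD n 0 = (p.count n : Int) + 1 := by
      rw [hd n]
      have : (p ++ [n]).count n = p.count n + 1 := by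
        rw [List.count_append, List.count_cons]; simp
      rw [this]; push_cast; ring
    rw [hn]
    split_ifs with h
    · rfl
    · exact ih (p ++ [n]) _ M hd

-- B's maxfreq is the maximum running count.
theorem pvMaxfreq_eq (l : List Int) (hl : l ≠ []) :
    (PySem.List.max? (PySem.Dict.counter l).values (fun v => v)).getD 0 = pvMc [] l := by
  have hvals : (PySem.Dict.counter l).values
      = (PySem.Set.ofList l).map (fun k => (l.count k : Int)) := by
    show ((PySem.Dict.counter l).items).map (·.2) = _
    rw [PySem.Dict.items_counter]
    simp [List.map_map, Function.comp]
  have hne : PySem.Set.ofList l ≠ [] := by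
    rcases List.exists_mem_of_ne_nil l hl with ⟨a, ha⟩
    intro h
    have : a ∈ PySem.Set.ofList l := (PySem.Set.mem_ofList _ _).mpr ha
    simp [h] at this
  have hVne : (PySem.Dict.counter l).values ≠ [] := by
    rw [hvals]; simpa using hne
  obtain ⟨v, hv⟩ : ∃ v, PySem.List.max? (PySem.Dict.counter l).values (fun v => v) = some v := by
    cases hmax : PySem.List.max? (PySem.Dict.counter l).values (fun v => v) with
    | none => exact absurd ((PySem.List.max?_eq_none_iff _ _).mp hmax) hVne
    | some v => exact ⟨v, rfl⟩
  rw [hv]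
  have hmem := PySem.List.max?_mem hv
  have hub := PySem.List.max?_isMax hv
  rw [hvals] at hmem hub
  rcases List.mem_map.mp hmem with ⟨k, hk, hkv⟩
  have hkl : k ∈ l := (PySem.Set.mem_ofList _ _).mp hk
  -- v ≤ pvMc [] l
  have h1 : v ≤ pvMc [] l := by
    have := pvMc_bound l [] k hkl
    simpa [hkv.symm] using this
  -- pvMc [] l ≤ v
  have h2 : pvMc [] l ≤ v := by
    rcases pvMc_attained l [] hl with ⟨y, hy, hmy⟩
    have hyV : (l.count y : Int) ∈ (PySem.Set.ofList l).map (fun k => (l.count k : Int)) :=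
      List.mem_map.mpr ⟨y, (PySem.Set.mem_ofList _ _).mpr hy, rfl⟩
    have := hub _ hyV
    simp only [List.nil_append] at hmy
    omega
  simp only [Option.getD_some]
  omega

-- ===== VERDICT (by name: the statement is the Claim_ definition above) =====
theorem numero_que_mais_cresce_spec : Claim_equal_numero_que_mais_cresce := by
  intro numeros _
  unfold Spec_numero_que_mais_cresce numero_que_mais_cresce numero_que_mais_cresce_alt
  have hemp : ∀ x : Int, (PySem.Dict.empty : PySem.Dict Int Int).getD x 0 = (([] : List Int).count x : Int) := by
    intro x; simp [PySem.Dict.getD_empty]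
  rw [pvFoldA_eq numeros [] _ 0 none hemp,
    pvAgo_eq numeros [] 0 none (by intro x; simp)]
  rw [PySem.Dict.foldl_insert_getD_add_one_eq_counter]
  by_cases hl : numeros = []
  · subst hl
    simp [pvMc, PySem.Dict.counter, PySem.Dict.empty]
  · have hMpos := pvMc_pos numeros [] hl
    rw [if_neg (by omega)]
    have hne : (PySem.Dict.counter numeros).items ≠ [] := by
      rw [PySem.Dict.items_counter]
      rcases List.exists_mem_of_ne_nil numeros hl with ⟨a, ha⟩
      intro h
      have : a ∈ PySem.Set.ofList numeros := (PySem.Set.mem_ofList _ _).mpr ha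
      have := List.map_eq_nil_iff.mp h
      simp [this] at this ⊢
      exact absurd this (by simp_all)
    rw [if_neg (by simpa [List.isEmpty_iff] using hne)]
    rw [pvMaxfreq_eq numeros hl]
    exact (pvScanLoop_eq numeros [] _ _ hemp).symm
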